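-- pv_equiv track=rewrite | github.com/ivanpukhov/pah | main.py | localize_day_and_month
-- ===== SOURCE A (Python) =====
-- def localize_day_and_month(date_formatted, date_obj):
--     months = {
--         "January": "января",
--         "February": "февраля",
--         "March": "марта",
--         "April": "апреля",
--         "May": "мая",
--         "June": "июня",
--         "July": "июля",
--         "August": "августа",
--         "September": "сентября",
--         "October": "октября",
--         "November": "ноября",
--         "December": "декабря"
--     }
--     days = {
--         "Monday": "понедельник",
--         "Tuesday": "вторник",
--         "Wednesday": "среда",
--         "Thursday": "четверг",
--         "Friday": "пятница",
--         "Saturday": "суббота",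
--         "Sunday": "воскресенье"
--     }
--
--     for en_month, ru_month in months.items():
--         date_formatted = date_formatted.replace(en_month, ru_month)
--
--     for en_day, ru_day in days.items():
--         date_formatted = date_formatted.replace(en_day, ru_day)
--
--     return date_formatted
-- ===== SOURCE B (Python) =====
-- TABLE = [
--     ("January", "\u044f\u043d\u0432\u0430\u0440\u044f"),
--     ("February", "\u0444\u0435\u0432\u0440\u0430\u043b\u044f"),
--     ("March", "\u043c\u0430\u0440\u0442\u0430"),
--     ("April", "\u0430\u043f\u0440\u0435\u043b\u044f"),
--     ("May", "\u043c\u0430\u044f"),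
--     ("June", "\u0438\u044e\u043d\u044f"),
--     ("July", "\u0438\u044e\u043b\u044f"),
--     ("August", "\u0430\u0432\u0433\u0443\u0441\u0442\u0430"),
--     ("September", "\u0441\u0435\u043d\u0442\u044f\u0431\u0440\u044f"),
--     ("October", "\u043e\u043a\u0442\u044f\u0431\u0440\u044f"),
--     ("November", "\u043d\u043e\u044f\u0431\u0440\u044f"),
--     ("December", "\u0434\u0435\u043a\u0430\u0431\u0440\u044f"),
--     ("Monday", "\u043f\u043e\u043d\u0435\u0434\u0435\u043b\u044c\u043d\u0438\u043a"),
--     ("Tuesday", "\u0432\u0442\u043e\u0440\u043d\u0438\u043a"),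
--     ("Wednesday", "\u0441\u0440\u0435\u0434\u0430"),
--     ("Thursday", "\u0447\u0435\u0442\u0432\u0435\u0440\u0433"),
--     ("Friday", "\u043f\u044f\u0442\u043d\u0438\u0446\u0430"),
--     ("Saturday", "\u0441\u0443\u0431\u0431\u043e\u0442\u0430"),
--     ("Sunday", "\u0432\u043e\u0441\u043a\u0440\u0435\u0441\u0435\u043d\u044c\u0435"),
-- ]
--
--
-- def localize_day_and_month(date_formatted, date_obj):
--     # One left-to-right scan: at each position try the 19 English names;
--     # on a match emit the Russian word and jump past the name, else copy the char.
--     out = []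
--     i = 0
--     n = len(date_formatted)
--     while i < n:
--         for en, ru in TABLE:
--             if date_formatted.startswith(en, i):
--                 out.append(ru)
--                 i += len(en)
--                 break
--         else:
--             out.append(date_formatted[i])
--             i += 1
--     return "".join(out)
-- ===== Notes on version B (the rewrite author's own statement) =====
-- stated objective: alternative
-- what changed: Replaces A's 19 sequential whole-string .replace passes with a single left-to-right scan that tries the 19 English names at each position via one lookup table (valid because no name is a prefix of another, matches cannot overlap, and the Cyrillic outputs contain no English name).
import Mathlib
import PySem

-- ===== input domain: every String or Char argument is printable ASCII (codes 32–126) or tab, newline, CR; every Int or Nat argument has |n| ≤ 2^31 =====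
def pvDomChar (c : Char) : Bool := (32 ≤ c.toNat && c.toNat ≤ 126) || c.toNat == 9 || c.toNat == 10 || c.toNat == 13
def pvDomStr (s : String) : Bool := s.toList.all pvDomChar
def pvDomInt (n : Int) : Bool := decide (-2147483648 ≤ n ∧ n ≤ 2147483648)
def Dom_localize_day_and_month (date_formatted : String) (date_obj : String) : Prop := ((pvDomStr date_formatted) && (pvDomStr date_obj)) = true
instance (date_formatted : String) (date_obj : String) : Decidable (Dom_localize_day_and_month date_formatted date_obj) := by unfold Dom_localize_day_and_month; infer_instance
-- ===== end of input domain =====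

-- B replaces A's 19 sequential whole-string .replace passes by one left-to-right scan
-- with a single 19-entry lookup table (objective: alternative single-pass algorithm).

-- ===== PORT A =====
-- the months dict literal of A, in insertion order
def pvMonths : List (String × String) :=
  [("January", "января"), ("February", "февраля"), ("March", "марта"),
   ("April", "апреля"), ("May", "мая"), ("June", "июня"), ("July", "июля"),
   ("August", "августа"), ("September", "сентября"), ("October", "октября"),
   ("November", "ноября"), ("December", "декабря")]

-- the days dict literal of A, in insertion order
def pvDays : List (String × String) :=
  [("Monday", "понедельник"), ("Tuesday", "вторник"), ("Wednesday", "среда"),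
   ("Thursday", "четверг"), ("Friday", "пятница"), ("Saturday", "суббота"),
   ("Sunday", "воскресенье")]

-- A: one .replace pass over the whole string per month, then per day
def localize_day_and_month (date_formatted : String) (date_obj : String) : String :=
  let s1 := pvMonths.foldl (fun acc p => PySem.Str.replace acc p.1 p.2) date_formatted
  pvDays.foldl (fun acc p => PySem.Str.replace acc p.1 p.2) s1

-- ===== PORT B =====
-- Source B's TABLE constant (months then days)
def pvTable : List (String × String) :=
  [("January", "января"), ("February", "февраля"), ("March", "марта"),
   ("April", "апреля"), ("May", "мая"), ("June", "июня"), ("July", "июля"),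
   ("August", "августа"), ("September", "сентября"), ("October", "октября"),
   ("November", "ноября"), ("December", "декабря"),
   ("Monday", "понедельник"), ("Tuesday", "вторник"), ("Wednesday", "среда"),
   ("Thursday", "четверг"), ("Friday", "пятница"), ("Saturday", "суббота"),
   ("Sunday", "воскресенье")]

-- the table with keys/values as char lists (the scan works character-wise,
-- as Source B's startswith(en, i) does)
def pvTableC : List (List Char × List Char) :=
  pvTable.map (fun p => (p.1.toList, p.2.toList))

-- Source B's inner `for en, ru in TABLE: if date_formatted.startswith(en, i)` loop:
-- first table entry whose key is a prefix at the current position; returns the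
-- Russian word and the remaining characters after the key
def pvTryKeys (tbl : List (List Char × List Char)) (s : List Char) :
    Option (List Char × List Char) :=
  match tbl with
  | [] => none
  | (en, ru) :: rest =>
    if en.isPrefixOf s then some (ru, s.drop en.length) else pvTryKeys rest s

-- Source B's `while i < n` scan; fuel = number of remaining characters bounds the loop
def pvScan (tbl : List (List Char × List Char)) : Nat → List Char → List Char
  | _, [] => []
  | 0, c :: t => c :: t
  | fuel + 1, c :: t =>
    match pvTryKeys tbl (c :: t) with
    | some (ru, rest) => ru ++ pvScan tbl fuel rest
    | none => c :: pvScan tbl fuel t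

def localize_day_and_month_alt (date_formatted : String) (date_obj : String) : String :=
  String.ofList (pvScan pvTableC date_formatted.toList.length date_formatted.toList)

-- ===== PRECONDITION & SPEC =====
def Spec_localize_day_and_month (date_formatted : String) (date_obj : String) (out : String) : Prop := out = localize_day_and_month_alt date_formatted date_obj
instance (date_formatted : String) (date_obj : String) (out : String) : Decidable (Spec_localize_day_and_month date_formatted date_obj out) := by unfold Spec_localize_day_and_month; infer_instance

-- ===== CLAIM (what is proved, stated in full; the proofs are below) =====
def Claim_equal_localize_day_and_month : Prop := ∀ (date_formatted : String) (date_obj : String), Dom_localize_day_and_month date_formatted date_obj → Spec_localize_day_and_month date_formatted date_obj (localize_day_and_month date_formatted date_obj)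

-- ===== LEMMAS AND PROOFS =====

-- A's pass structure, character-wise: fold of Chars.replace over a key/value table
def pvChain (tbl : List (List Char × List Char)) (s : List Char) : List Char :=
  tbl.foldl (fun acc p => PySem.Chars.replace acc p.1 p.2) s

-- ---- facts about the concrete table (all by computation) ----
theorem pv_tbl_b1 : (pvTableC.all fun p => !p.1.isEmpty && !p.2.isEmpty) = true := by rfl

theorem pv_tbl_b2 : (pvTableC.all fun p => p.1.all fun c => decide (c.toNat ≤ 126)) = true := by rfl

theorem pv_tbl_b3 : (pvTableC.all fun p => p.2.all fun c => decide (126 < c.toNat)) = true := by rfl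

theorem pv_tbl_b4 : (pvTableC.all fun p => (p.1.take 1).all fun c => decide (65 ≤ c.toNat ∧ c.toNat ≤ 90)) = true := by rfl

theorem pv_tbl_b5 : (pvTableC.all fun p => p.1.tail.all fun c => decide (97 ≤ c.toNat ∧ c.toNat ≤ 122)) = true := by rfl

theorem pv_tbl_b6 : (pvTableC.all fun p => pvTableC.all fun q => decide (p.1 <+: q.1 → p = q)) = true := by rfl

theorem pvTableC_ne : ∀ p ∈ pvTableC, p.1 ≠ [] ∧ p.2 ≠ [] := by
  intro p hp
  have h := List.all_eq_true.mp pv_tbl_b1 p hp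
  rw [Bool.and_eq_true, Bool.not_eq_eq_eq_not, Bool.not_eq_eq_eq_not] at h
  exact ⟨fun hc => by simp [hc] at h, fun hc => by simp [hc] at h⟩

theorem pvTableC_keys_ascii : ∀ p ∈ pvTableC, ∀ c ∈ p.1, c.toNat ≤ 126 := by
  intro p hp c hc
  exact of_decide_eq_true (List.all_eq_true.mp (List.all_eq_true.mp pv_tbl_b2 p hp) c hc)

theorem pvTableC_vals_cyr : ∀ p ∈ pvTableC, ∀ c ∈ p.2, 126 < c.toNat := by
  intro p hp c hc
  exact of_decide_eq_true (List.all_eq_true.mp (List.all_eq_true.mp pv_tbl_b3 p hp) c hc)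

theorem pvTableC_head_upper : ∀ p ∈ pvTableC, ∀ c ∈ p.1.take 1, 65 ≤ c.toNat ∧ c.toNat ≤ 90 := by
  intro p hp c hc
  exact of_decide_eq_true (List.all_eq_true.mp (List.all_eq_true.mp pv_tbl_b4 p hp) c hc)

theorem pvTableC_tail_lower : ∀ p ∈ pvTableC, ∀ c ∈ p.1.tail, 97 ≤ c.toNat ∧ c.toNat ≤ 122 := by
  intro p hp c hc
  exact of_decide_eq_true (List.all_eq_true.mp (List.all_eq_true.mp pv_tbl_b5 p hp) c hc)

-- no character of any key occurs in any replacement (keys ASCII, values Cyrillic)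
theorem pvTableC_disj : ∀ p ∈ pvTableC, ∀ q ∈ pvTableC, ∀ c ∈ q.1, c ∉ p.2 := by
  intro p hp q hq c hc hcv
  have h1 := pvTableC_keys_ascii q hq c hc
  have h2 := pvTableC_vals_cyr p hp c hcv
  omega

-- no key starts with a non-initial character of a key (keys start uppercase and
-- continue lowercase), so matches of two keys can never overlap
theorem pvTableC_int : ∀ p ∈ pvTableC, ∀ q ∈ pvTableC, ∀ c ∈ q.1.tail, p.1.head? ≠ some c := by
  intro p hp q hq c hc heq
  have h2 := pvTableC_tail_lower q hq c hc
  have h1 : c ∈ p.1.take 1 := by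
    cases hp1 : p.1 with
    | nil => rw [hp1] at heq; simp at heq
    | cons a t =>
      rw [hp1] at heq
      simp only [List.head?_cons, Option.some.injEq] at heq
      subst heq
      simp
  have h3 := pvTableC_head_upper p hp c h1
  omega

-- no key is a prefix of a different entry's key
theorem pvTableC_pf : ∀ p ∈ pvTableC, ∀ q ∈ pvTableC, p.1 <+: q.1 → p = q := by
  intro p hp q hq
  exact of_decide_eq_true (List.all_eq_true.mp (List.all_eq_true.mp pv_tbl_b6 p hp) q hq)

set_option maxRecDepth 4000 in
theorem pvTableC_nd : (pvTableC.map Prod.fst).Nodup := by decide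

-- ---- a recursion principle for PySem.Chars.replace (greedy left-to-right) ----
theorem pv_go_acc (k r : List Char) (hk : k ≠ []) :
    ∀ (fuel : Nat) (l acc : List Char), l.length ≤ fuel →
      PySem.Chars.replace.go k r fuel l acc
        = acc.reverse ++ PySem.Chars.replace.go k r fuel l [] := by
  intro fuel
  induction fuel with
  | zero =>
    intro l acc h
    simp [PySem.Chars.replace.go]
  | succ n ih =>
    intro l acc h
    cases l with
    | nil => simp [PySem.Chars.replace.go]
    | cons c t =>
      have hlt : (List.drop k.length (c :: t)).length ≤ n := by
        have : 1 ≤ k.length := List.length_pos_iff.mpr hk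
        simp only [List.length_drop, List.length_cons] at *
        omega
      have hlt2 : t.length ≤ n := by
        simp only [List.length_cons] at h; omega
      simp only [PySem.Chars.replace.go]
      by_cases hp : k.isPrefixOf (c :: t) = true
      · rw [if_pos hp, if_pos hp, ih _ (r.reverse ++ acc) hlt, ih _ (r.reverse ++ []) hlt]
        simp
      · rw [if_neg hp, if_neg hp, ih t (c :: acc) hlt2, ih t (c :: []) hlt2]
        simp

theorem pv_go_fuel (k r : List Char) (hk : k ≠ []) :
    ∀ (f1 f2 : Nat) (l : List Char), l.length ≤ f1 → l.length ≤ f2 →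
      PySem.Chars.replace.go k r f1 l [] = PySem.Chars.replace.go k r f2 l [] := by
  intro f1
  induction f1 with
  | zero =>
    intro f2 l h1 h2
    have : l = [] := List.length_eq_zero_iff.mp (Nat.le_zero.mp h1)
    subst this
    cases f2 <;> simp [PySem.Chars.replace.go]
  | succ n ih =>
    intro f2 l h1 h2
    cases l with
    | nil => cases f2 <;> simp [PySem.Chars.replace.go]
    | cons c t =>
      cases f2 with
      | zero => simp [List.length_cons] at h2
      | succ m =>
        have hk1 : 1 ≤ k.length := List.length_pos_iff.mpr hk
        have hltd : (List.drop k.length (c :: t)).length ≤ n := by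
          simp only [List.length_drop, List.length_cons] at *; omega
        have hltd2 : (List.drop k.length (c :: t)).length ≤ m := by
          simp only [List.length_drop, List.length_cons] at *; omega
        have hlt : t.length ≤ n := by simp only [List.length_cons] at h1; omega
        have hlt2 : t.length ≤ m := by simp only [List.length_cons] at h2; omega
        simp only [PySem.Chars.replace.go]
        by_cases hp : k.isPrefixOf (c :: t) = true
        · rw [if_pos hp, if_pos hp,
            pv_go_acc k r hk n _ (r.reverse ++ []) hltd,
            pv_go_acc k r hk m _ (r.reverse ++ []) hltd2,
            ih m (List.drop k.length (c :: t)) hltd hltd2]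
        · rw [if_neg hp, if_neg hp,
            pv_go_acc k r hk n t (c :: []) hlt, pv_go_acc k r hk m t (c :: []) hlt2,
            ih m t hlt hlt2]

theorem pv_replace_nil (k r : List Char) (hk : k ≠ []) :
    PySem.Chars.replace [] k r = [] := by
  have : k.isEmpty = false := by simp [hk]
  simp [PySem.Chars.replace, this, PySem.Chars.replace.go]

theorem pv_replace_cons_neg (k r : List Char) (c : Char) (t : List Char) (hk : k ≠ [])
    (h : ¬ k <+: (c :: t)) : PySem.Chars.replace (c :: t) k r = c :: PySem.Chars.replace t k r := by
  have hke : k.isEmpty = false := by simp [hk]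
  have hp : k.isPrefixOf (c :: t) = false := by
    rw [Bool.eq_false_iff]
    intro hcon
    exact h (List.isPrefixOf_iff_prefix.mp hcon)
  simp only [PySem.Chars.replace, hke, Bool.false_eq_true, if_false, List.length_cons]
  simp only [PySem.Chars.replace.go, hp, Bool.false_eq_true, if_false]
  rw [pv_go_acc k r hk t.length t [c] (le_refl _)]
  simp

theorem pv_replace_pre (k r : List Char) (s : List Char) (hk : k ≠ []) (h : k <+: s) :
    PySem.Chars.replace s k r = r ++ PySem.Chars.replace (s.drop k.length) k r := by
  have hke : k.isEmpty = false := by simp [hk]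
  have hk1 : 1 ≤ k.length := List.length_pos_iff.mpr hk
  cases s with
  | nil =>
    exact absurd (List.prefix_nil.mp h) hk
  | cons c t =>
    have hp : k.isPrefixOf (c :: t) = true := List.isPrefixOf_iff_prefix.mpr h
    have hltd : (List.drop k.length (c :: t)).length ≤ t.length := by
      simp only [List.length_drop, List.length_cons]; omega
    simp only [PySem.Chars.replace, hke, Bool.false_eq_true, if_false, List.length_cons]
    simp only [PySem.Chars.replace.go, hp, if_true]
    rw [pv_go_acc k r hk t.length (List.drop k.length (c :: t)) (r.reverse ++ []) hltd]
    rw [pv_go_fuel k r hk t.length (List.drop k.length (c :: t)).length _ hltd (le_refl _)]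
    simp

-- a non-match at the front survives a replace pass (the inserted text r shares
-- no character with u)
theorem pv_not_prefix_replace (k r : List Char) (hk : k ≠ []) (hr : r ≠ []) :
    ∀ (s u : List Char), (∀ c ∈ u, c ∉ r) → ¬ u <+: s →
      ¬ u <+: PySem.Chars.replace s k r := by
  intro s
  induction s with
  | nil =>
    intro u hu h
    rw [pv_replace_nil k r hk]
    exact h
  | cons c t ih =>
    intro u hu h
    by_cases hp : k <+: (c :: t)
    · rw [pv_replace_pre k r (c :: t) hk hp]
      intro hcon
      cases u with
      | nil => exact h (List.nil_prefix)
      | cons d u' =>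
        cases r with
        | nil => exact hr rfl
        | cons r0 r' =>
          rw [List.cons_append, List.cons_prefix_cons] at hcon
          exact hu d (List.mem_cons_self) (hcon.1 ▸ List.mem_cons_self)
    · rw [pv_replace_cons_neg k r c t hk hp]
      intro hcon
      cases u with
      | nil => exact h (List.nil_prefix)
      | cons d u' =>
        rw [List.cons_prefix_cons] at hcon
        have hd : d = c := hcon.1
        have h' : ¬ u' <+: t := by
          intro hcon2
          exact h (by rw [hd]; exact (List.cons_prefix_cons).mpr ⟨rfl, hcon2⟩)
        exact ih u' (fun x hx => hu x (List.mem_cons_of_mem d hx)) h' hcon.2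

-- a replace pass walks past a region v in which k matches nowhere
theorem pv_replace_skip (k r : List Char) (hk : k ≠ []) :
    ∀ (v X : List Char), (∀ j, j < v.length → ¬ k <+: (v.drop j ++ X)) →
      PySem.Chars.replace (v ++ X) k r = v ++ PySem.Chars.replace X k r := by
  intro v
  induction v with
  | nil => intro X h; simp
  | cons c w ih =>
    intro X h
    have h0 : ¬ k <+: ((c :: w) ++ X) := by
      have := h 0 (by simp)
      simpa using this
    rw [List.cons_append, pv_replace_cons_neg k r c (w ++ X) hk h0]
    rw [ih X (fun j hj => by
      have := h (j + 1) (by simp; omega)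
      simpa using this)]
    rfl

theorem pv_chain_nil (tbl : List (List Char × List Char))
    (hne : ∀ p ∈ tbl, p.1 ≠ []) : pvChain tbl [] = [] := by
  induction tbl with
  | nil => rfl
  | cons p rest ih =>
    have : PySem.Chars.replace [] p.1 p.2 = [] :=
      pv_replace_nil p.1 p.2 (hne p List.mem_cons_self)
    simp only [pvChain, List.foldl_cons, this]
    exact ih (fun q hq => hne q (List.mem_cons_of_mem p hq))

-- the whole chain walks past a region v containing no key characters
theorem pv_chain_skip (tbl : List (List Char × List Char)) :
    ∀ (v X : List Char), (∀ p ∈ tbl, p.1 ≠ []) → (∀ p ∈ tbl, ∀ c ∈ p.1, c ∉ v) →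
      pvChain tbl (v ++ X) = v ++ pvChain tbl X := by
  induction tbl with
  | nil => intro v X _ _; rfl
  | cons p rest ih =>
    intro v X hne hv
    have hk : p.1 ≠ [] := hne p List.mem_cons_self
    have hstep : PySem.Chars.replace (v ++ X) p.1 p.2 = v ++ PySem.Chars.replace X p.1 p.2 := by
      apply pv_replace_skip p.1 p.2 hk
      intro j hj hcon
      rw [← List.getElem_cons_drop hj, List.cons_append] at hcon
      cases hk1 : p.1 with
      | nil => exact hk hk1
      | cons k0 k' =>
        rw [hk1, List.cons_prefix_cons] at hcon
        exact hv p List.mem_cons_self k0 (by rw [hk1]; exact List.mem_cons_self)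
          (hcon.1 ▸ List.getElem_mem hj)
    simp only [pvChain, List.foldl_cons, hstep]
    exact ih v (PySem.Chars.replace X p.1 p.2)
      (fun q hq => hne q (List.mem_cons_of_mem p hq))
      (fun q hq => hv q (List.mem_cons_of_mem p hq))

-- when no key matches at the front, the chain keeps the first character
theorem pv_chain_cons (tbl : List (List Char × List Char)) :
    ∀ (c : Char) (t : List Char),
      (∀ p ∈ tbl, p.1 ≠ [] ∧ p.2 ≠ []) →
      (∀ p ∈ tbl, ∀ q ∈ tbl, ∀ ch ∈ q.1, ch ∉ p.2) →
      (∀ p ∈ tbl, ¬ p.1 <+: (c :: t)) →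
      pvChain tbl (c :: t) = c :: pvChain tbl t := by
  induction tbl with
  | nil => intro c t _ _ _; rfl
  | cons p rest ih =>
    intro c t hne hdisj h
    have hk : p.1 ≠ [] := (hne p List.mem_cons_self).1
    have hr : p.2 ≠ [] := (hne p List.mem_cons_self).2
    have hstep : PySem.Chars.replace (c :: t) p.1 p.2 = c :: PySem.Chars.replace t p.1 p.2 :=
      pv_replace_cons_neg p.1 p.2 c t hk (h p List.mem_cons_self)
    simp only [pvChain, List.foldl_cons, hstep]
    apply ih c (PySem.Chars.replace t p.1 p.2)
      (fun q hq => hne q (List.mem_cons_of_mem p hq))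
      (fun q hq q' hq' => hdisj q (List.mem_cons_of_mem p hq) q' (List.mem_cons_of_mem p hq'))
    intro q hq hcon
    have hnp : ¬ q.1 <+: PySem.Chars.replace (c :: t) p.1 p.2 :=
      pv_not_prefix_replace p.1 p.2 hk hr (c :: t) q.1
        (hdisj p List.mem_cons_self q (List.mem_cons_of_mem p hq))
        (h q (List.mem_cons_of_mem p hq))
    rw [hstep] at hnp
    exact hnp hcon

-- when the key k of a table entry matches at the front, the chain as a whole
-- outputs its replacement and continues after the match
theorem pv_chain_match (tbl : List (List Char × List Char)) :
    ∀ (k r rest : List Char),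
      (∀ p ∈ tbl, p.1 ≠ [] ∧ p.2 ≠ []) →
      (∀ p ∈ tbl, ∀ q ∈ tbl, ∀ c ∈ q.1, c ∉ p.2) →
      (∀ p ∈ tbl, ∀ q ∈ tbl, ∀ c ∈ q.1.tail, p.1.head? ≠ some c) →
      (∀ p ∈ tbl, ∀ q ∈ tbl, p.1 <+: q.1 → p = q) →
      (tbl.map Prod.fst).Nodup →
      (k, r) ∈ tbl →
      pvChain tbl (k ++ rest) = r ++ pvChain tbl rest := by
  induction tbl with
  | nil => intro k r rest _ _ _ _ _ hmem; exact absurd hmem (List.not_mem_nil)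
  | cons p tl ih =>
    intro k r rest hne hdisj hint hpf hnd hmem
    have hkne : k ≠ [] := by
      have := (hne (k, r) hmem).1; exact this
    rcases List.mem_cons.mp hmem with heq | htl
    · -- p = (k, r): it fires immediately
      have hp1 : p.1 = k := by rw [← heq]
      have hp2 : p.2 = r := by rw [← heq]
      have hstep : PySem.Chars.replace (k ++ rest) p.1 p.2
          = r ++ PySem.Chars.replace rest p.1 p.2 := by
        rw [hp1, hp2, pv_replace_pre k r (k ++ rest) hkne (List.prefix_append k rest),
          List.drop_left]
      simp only [pvChain, List.foldl_cons, hstep]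
      have := pv_chain_skip tl r (PySem.Chars.replace rest p.1 p.2)
        (fun q hq => (hne q (List.mem_cons_of_mem p hq)).1)
        (fun q hq c hc hcr =>
          hdisj p List.mem_cons_self q (List.mem_cons_of_mem p hq) c hc (hp2 ▸ hcr))
      exact this
    · -- (k, r) is further down: p walks past the k-match untouched
      have hp1k : p.1 ≠ k := by
        intro hcon
        have h1 : p.1 ∈ tl.map Prod.fst := hcon ▸ (List.mem_map.mpr ⟨(k, r), htl, rfl⟩)
        have := (List.nodup_cons.mp hnd).1
        exact this h1
      have hpne : p.1 ≠ [] := (hne p List.mem_cons_self).1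
      have hstep : PySem.Chars.replace (k ++ rest) p.1 p.2
          = k ++ PySem.Chars.replace rest p.1 p.2 := by
        apply pv_replace_skip p.1 p.2 hpne
        intro j hj hcon
        rcases Nat.eq_zero_or_pos j with hj0 | hjpos
        · subst hj0
          simp only [List.drop_zero] at hcon
          have hk2 : k <+: (k ++ rest) := List.prefix_append k rest
          rcases List.prefix_or_prefix_of_prefix hcon hk2 with hc | hc
          · exact hp1k (congrArg Prod.fst
              (hpf p List.mem_cons_self (k, r) hmem hc))
          · exact hp1k (congrArg Prod.fst
              (hpf (k, r) hmem p List.mem_cons_self hc)).symm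
        · have hdrop : k.drop j = k[j] :: k.drop (j + 1) := (List.getElem_cons_drop hj).symm
          rw [hdrop, List.cons_append] at hcon
          cases hq1 : p.1 with
          | nil => exact hpne hq1
          | cons p0 p' =>
            rw [hq1, List.cons_prefix_cons] at hcon
            have hmemtail : k[j] ∈ k.tail := by
              have hjt : j - 1 < k.tail.length := by
                simp only [List.length_tail]; omega
              have : k.tail[j - 1] = k[j] := by
                rw [List.getElem_tail]
                congr 1
                omega
              exact this ▸ List.getElem_mem hjt
            have := hint p List.mem_cons_self (k, r) hmem k[j] hmemtail
            rw [hq1] at this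
            simp only [List.head?_cons] at this
            exact this (by rw [hcon.1])
      simp only [pvChain, List.foldl_cons, hstep]
      exact ih k r (PySem.Chars.replace rest p.1 p.2)
        (fun q hq => hne q (List.mem_cons_of_mem p hq))
        (fun q hq q' hq' => hdisj q (List.mem_cons_of_mem p hq) q' (List.mem_cons_of_mem p hq'))
        (fun q hq q' hq' => hint q (List.mem_cons_of_mem p hq) q' (List.mem_cons_of_mem p hq'))
        (fun q hq q' hq' => hpf q (List.mem_cons_of_mem p hq) q' (List.mem_cons_of_mem p hq'))
        ((List.nodup_cons.mp hnd).2) htl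

-- ---- characterisation of pvTryKeys ----
theorem pv_tryKeys_none (tbl : List (List Char × List Char)) (s : List Char) :
    pvTryKeys tbl s = none → ∀ p ∈ tbl, ¬ p.1 <+: s := by
  induction tbl with
  | nil => intro _ p hp; exact absurd hp (List.not_mem_nil)
  | cons q rest ih =>
    intro h p hp
    rcases q with ⟨en, ru⟩
    simp only [pvTryKeys] at h
    by_cases hpre : en.isPrefixOf s = true
    · rw [if_pos hpre] at h; exact absurd h (by simp)
    · rw [if_neg hpre] at h
      rcases List.mem_cons.mp hp with heq | htl
      · subst heq
        simp only
        intro hcon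
        exact hpre (List.isPrefixOf_iff_prefix.mpr hcon)
      · exact ih h p htl

theorem pv_tryKeys_some (tbl : List (List Char × List Char)) (s ru rest : List Char) :
    pvTryKeys tbl s = some (ru, rest) →
      ∃ k, (k, ru) ∈ tbl ∧ k <+: s ∧ rest = s.drop k.length := by
  induction tbl with
  | nil => intro h; exact absurd h (by simp [pvTryKeys])
  | cons q tl ih =>
    intro h
    rcases q with ⟨en, ru'⟩
    simp only [pvTryKeys] at h
    by_cases hpre : en.isPrefixOf s = true
    · rw [if_pos hpre] at h
      have h1 : ru' = ru ∧ s.drop en.length = rest := by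
        have := Option.some.inj h
        exact ⟨congrArg Prod.fst this, congrArg Prod.snd this⟩
      exact ⟨en, by rw [← h1.1]; exact List.mem_cons_self,
        List.isPrefixOf_iff_prefix.mp hpre, h1.2.symm⟩
    · rw [if_neg hpre] at h
      rcases ih h with ⟨k, hk1, hk2, hk3⟩
      exact ⟨k, List.mem_cons_of_mem _ hk1, hk2, hk3⟩

-- ---- the scan's fuel is irrelevant once it covers the string ----
theorem pv_scan_fuel (tbl : List (List Char × List Char))
    (hne : ∀ p ∈ tbl, p.1 ≠ []) :
    ∀ (f1 f2 : Nat) (s : List Char), s.length ≤ f1 → s.length ≤ f2 →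
      pvScan tbl f1 s = pvScan tbl f2 s := by
  intro f1
  induction f1 with
  | zero =>
    intro f2 s h1 h2
    have : s = [] := List.length_eq_zero_iff.mp (Nat.le_zero.mp h1)
    subst this
    cases f2 <;> rfl
  | succ n ih =>
    intro f2 s h1 h2
    cases s with
    | nil => cases f2 <;> rfl
    | cons c t =>
      cases f2 with
      | zero => simp [List.length_cons] at h2
      | succ m =>
        simp only [List.length_cons] at h1 h2
        cases htk : pvTryKeys tbl (c :: t) with
        | none =>
          simp only [pvScan, htk]
          rw [ih m t (by omega) (by omega)]
        | some pr =>
          rcases pr with ⟨ru, rest⟩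
          rcases pv_tryKeys_some tbl (c :: t) ru rest htk with ⟨k, hkmem, hkpre, hkrest⟩
          have hk1 : 1 ≤ k.length := List.length_pos_iff.mpr (hne (k, ru) hkmem)
          have hrl : rest.length ≤ t.length := by
            rw [hkrest]
            simp only [List.length_drop, List.length_cons]
            omega
          simp only [pvScan, htk]
          rw [ih m rest (by omega) (by omega)]

-- ---- main: the 19-pass chain equals the single scan ----
theorem pv_chain_eq_scan (tbl : List (List Char × List Char))
    (hne : ∀ p ∈ tbl, p.1 ≠ [] ∧ p.2 ≠ [])
    (hdisj : ∀ p ∈ tbl, ∀ q ∈ tbl, ∀ c ∈ q.1, c ∉ p.2)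
    (hint : ∀ p ∈ tbl, ∀ q ∈ tbl, ∀ c ∈ q.1.tail, p.1.head? ≠ some c)
    (hpf : ∀ p ∈ tbl, ∀ q ∈ tbl, p.1 <+: q.1 → p = q)
    (hnd : (tbl.map Prod.fst).Nodup) :
    ∀ (n : Nat) (s : List Char), s.length ≤ n →
      pvChain tbl s = pvScan tbl s.length s := by
  intro n
  induction n with
  | zero =>
    intro s h
    have : s = [] := List.length_eq_zero_iff.mp (Nat.le_zero.mp h)
    subst this
    exact pv_chain_nil tbl (fun p hp => (hne p hp).1)
  | succ n ih =>
    intro s h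
    cases s with
    | nil => exact pv_chain_nil tbl (fun p hp => (hne p hp).1)
    | cons c t =>
      simp only [List.length_cons] at h
      cases htk : pvTryKeys tbl (c :: t) with
      | none =>
        have hnp := pv_tryKeys_none tbl (c :: t) htk
        rw [pv_chain_cons tbl c t hne hdisj hnp]
        simp only [List.length_cons, pvScan, htk]
        rw [ih t (by omega)]
      | some pr =>
        rcases pr with ⟨ru, rest⟩
        rcases pv_tryKeys_some tbl (c :: t) ru rest htk with ⟨k, hkmem, hkpre, hkrest⟩
        have hk1 : 1 ≤ k.length := List.length_pos_iff.mpr (hne (k, ru) hkmem).1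
        rcases hkpre with ⟨w, hw⟩
        have hwrest : rest = w := by
          rw [hkrest, ← hw, List.drop_left]
        have hwl : w.length ≤ t.length := by
          have : k.length + w.length = t.length + 1 := by
            rw [← List.length_append, hw, List.length_cons]
          omega
        rw [← hw, pv_chain_match tbl k ru w hne hdisj hint hpf hnd hkmem,
          ih w (by omega), hw]
        simp only [List.length_cons, pvScan, htk]
        rw [hwrest, pv_scan_fuel tbl (fun p hp => (hne p hp).1) t.length w.length w hwl (le_refl _)]

-- ---- bridge: port A's String-level folds equal pvChain on pvTableC ----
theorem pv_fold_toList (tbl : List (String × String)) :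
    ∀ (s : String),
      (tbl.foldl (fun acc p => PySem.Str.replace acc p.1 p.2) s).toList
        = pvChain (tbl.map fun p => (p.1.toList, p.2.toList)) s.toList := by
  induction tbl with
  | nil => intro s; rfl
  | cons p rest ih =>
    intro s
    simp only [List.foldl_cons, List.map_cons, pvChain, ih (PySem.Str.replace s p.1 p.2)]
    simp only [PySem.Str.toList_replace]

set_option maxRecDepth 8000 in
theorem pv_tables_eq :
    (pvMonths.map fun p => (p.1.toList, p.2.toList))
      ++ (pvDays.map fun p => (p.1.toList, p.2.toList)) = pvTableC := by decide

theorem pv_A_toList (df dob : String) :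
    (localize_day_and_month df dob).toList = pvChain pvTableC df.toList := by
  unfold localize_day_and_month
  rw [pv_fold_toList pvDays, pv_fold_toList pvMonths]
  rw [show ∀ (t1 t2 : List (List Char × List Char)) (l : List Char),
        pvChain t2 (pvChain t1 l) = pvChain (t1 ++ t2) l from
      fun t1 t2 l => (List.foldl_append ..).symm]
  rw [pv_tables_eq]

-- ===== VERDICT (by name: the statement is the Claim_ definition above) =====
theorem localize_day_and_month_spec : Claim_equal_localize_day_and_month := by
  intro df dob _
  unfold Spec_localize_day_and_month
  have h2 := pv_chain_eq_scan pvTableC pvTableC_ne pvTableC_disj pvTableC_int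
    pvTableC_pf pvTableC_nd df.toList.length df.toList (le_refl _)
  calc localize_day_and_month df dob
      = String.ofList (localize_day_and_month df dob).toList := String.ofList_toList.symm
    _ = String.ofList (pvScan pvTableC df.toList.length df.toList) := by
        rw [pv_A_toList df dob, h2]
    _ = localize_day_and_month_alt df dob := rfl
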